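-- pv_equiv track=rewrite | github.com/IamTheVector/Forgetfulino | tools/forgetfulino_generator.py | text_to_c_array
-- ===== SOURCE A (Python) =====
-- def text_to_c_array(text: str, var_name: str) -> str:
--     """Convert text to a C char array in PROGMEM."""
--     lines: list[str] = []
--     chars: list[str] = []
--     total_chars = len(text)
--
--     for index, ch in enumerate(text):
--         if ch == "\n":
--             chars.append("'\\n'")
--         elif ch == "\r":
--             chars.append("'\\r'")
--         elif ch == "\t":
--             chars.append("'\\t'")
--         elif ch == "\\":
--             chars.append("'\\\\'")
--         elif ch == '"':
--             chars.append("'\\\"'")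
--         elif ch == "'":
--             chars.append("'\\''")
--         else:
--             chars.append(f"'{ch}'")
--
--         if (index + 1) % 16 == 0 or index == total_chars - 1:
--             lines.append("    " + ", ".join(chars))
--             chars = []
--
--     array_content = ",\n".join(lines)
--     return f"const char {var_name}[] PROGMEM = {{\n{array_content}\n}};"
-- ===== SOURCE B (Python) =====
-- def text_to_c_array(text: str, var_name: str) -> str:
--     """Convert text to a C char array in PROGMEM."""
--     esc = {
--         "\n": "'\\n'",
--         "\r": "'\\r'",
--         "\t": "'\\t'",
--         "\\": "'\\\\'",
--         '"': "'\\\"'",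
--         "'": "'\\''",
--     }
--     # phase 1: escape every character
--     chars = [esc.get(ch, f"'{ch}'") for ch in text]
--     # phase 2: group into lines of 16
--     lines = []
--     i = 0
--     while i < len(chars):
--         lines.append("    " + ", ".join(chars[i:i + 16]))
--         i += 16
--     array_content = ",\n".join(lines)
--     return f"const char {var_name}[] PROGMEM = {{\n{array_content}\n}};"
-- ===== Notes on version B (the rewrite author's own statement) =====
-- stated objective: simpler
-- what changed: Replaces A's single loop that interleaves escaping with modulo-16 flush logic by two separate phases: one map through an escape lookup table, then a chunk-by-16 grouping pass.
import Mathlib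
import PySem

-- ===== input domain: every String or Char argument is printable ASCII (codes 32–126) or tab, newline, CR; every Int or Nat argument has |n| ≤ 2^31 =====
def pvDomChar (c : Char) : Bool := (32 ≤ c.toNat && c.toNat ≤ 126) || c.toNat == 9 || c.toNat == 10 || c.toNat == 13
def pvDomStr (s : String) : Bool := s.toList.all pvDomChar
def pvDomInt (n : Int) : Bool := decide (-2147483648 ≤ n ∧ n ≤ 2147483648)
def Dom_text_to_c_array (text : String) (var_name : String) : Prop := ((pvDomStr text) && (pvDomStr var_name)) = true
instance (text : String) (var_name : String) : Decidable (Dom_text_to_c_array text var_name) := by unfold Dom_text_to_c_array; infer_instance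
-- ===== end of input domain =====

-- B separates escaping (one map via a lookup table) from line-grouping (a chunk-by-16 recursion),
-- instead of A's single loop interleaving both; objective: simpler decomposition, same cost.


-- ===== PORT A =====
-- A's if/elif escape chain, in the same branch order
def escA (ch : Char) : String :=
  if ch = '\n' then "'\\n'"
  else if ch = '\r' then "'\\r'"
  else if ch = '\t' then "'\\t'"
  else if ch = '\\' then "'\\\\'"
  else if ch = '"' then "'\\\"'"
  else if ch = '\'' then "'\\''"
  else "'" ++ String.singleton ch ++ "'"

-- one iteration of A's loop body; state = (lines, chars)
def aStep (total : Int) (st : List String × List String) (p : Int × Char) :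
    List String × List String :=
  let chars := st.2 ++ [escA p.2]
  if PySem.Int.mod (p.1 + 1) 16 = 0 ∨ p.1 = total - 1 then
    (st.1 ++ ["    " ++ PySem.Str.join ", " chars], [])
  else (st.1, chars)

def text_to_c_array (text : String) (var_name : String) : String :=
  let total_chars : Int := PySem.Str.len text
  let st := (PySem.List.enumerate text.toList 0).foldl (aStep total_chars) ([], [])
  let array_content := PySem.Str.join ",\n" st.1
  "const char " ++ var_name ++ "[] PROGMEM = {\n" ++ array_content ++ "\n};"

-- ===== PORT B =====
-- B's escape table; esc.get(ch, f"'{ch}'")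
def escTable : PySem.Dict Char String :=
  ((((((PySem.Dict.empty).insert '\n' "'\\n'").insert '\r' "'\\r'").insert '\t' "'\\t'").insert
      '\\' "'\\\\'").insert '"' "'\\\"'").insert '\'' "'\\''"

def escB (ch : Char) : String :=
  (escTable.get? ch).getD ("'" ++ String.singleton ch ++ "'")

-- B's while loop: index i steps by 16 over the escaped list; chars[i:i+16] is PySem.List.slice
def bLoop (chars : List String) (i : Int) : List String :=
  if h : i < (chars.length : Int) then
    ("    " ++ PySem.Str.join ", " (PySem.List.slice chars (some i) (some (i + 16)))) ::
      bLoop chars (i + 16)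
  else []
termination_by ((chars.length : Int) - i).toNat
decreasing_by omega

def text_to_c_array_alt (text : String) (var_name : String) : String :=
  let chars := text.toList.map escB
  let lines := bLoop chars 0
  let array_content := PySem.Str.join ",\n" lines
  "const char " ++ var_name ++ "[] PROGMEM = {\n" ++ array_content ++ "\n};"

-- ===== PRECONDITION & SPEC =====
def Spec_text_to_c_array (text : String) (var_name : String) (out : String) : Prop := out = text_to_c_array_alt text var_name
instance (text : String) (var_name : String) (out : String) : Decidable (Spec_text_to_c_array text var_name out) := by unfold Spec_text_to_c_array; infer_instance

-- ===== CLAIM (what is proved, stated in full; the proofs are below) =====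
def Claim_equal_text_to_c_array : Prop := ∀ (text : String) (var_name : String), Dom_text_to_c_array text var_name → Spec_text_to_c_array text var_name (text_to_c_array text var_name)

-- ===== LEMMAS AND PROOFS =====

-- proof-side chunking helper: structural chunk-by-16
def bChunk (chars : List String) : List String :=
  if h : chars = [] then []
  else ("    " ++ PySem.Str.join ", " (chars.take 16)) :: bChunk (chars.drop 16)
termination_by chars.length
decreasing_by
  have : 0 < chars.length := List.length_pos_iff.mpr h
  simp [List.length_drop]; omega


lemma esc_eq (ch : Char) : escA ch = escB ch := by
  by_cases h1 : ch = '\n'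
  · subst h1; rfl
  by_cases h2 : ch = '\r'
  · subst h2; rfl
  by_cases h3 : ch = '\t'
  · subst h3; rfl
  by_cases h4 : ch = '\\'
  · subst h4; rfl
  by_cases h5 : ch = '"'
  · subst h5; rfl
  by_cases h6 : ch = '\''
  · subst h6; rfl
  have e1 : ('\n' == ch) = false := beq_eq_false_iff_ne.mpr (fun he => h1 he.symm)
  have e2 : ('\r' == ch) = false := beq_eq_false_iff_ne.mpr (fun he => h2 he.symm)
  have e3 : ('\t' == ch) = false := beq_eq_false_iff_ne.mpr (fun he => h3 he.symm)
  have e4 : ('\\' == ch) = false := beq_eq_false_iff_ne.mpr (fun he => h4 he.symm)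
  have e5 : ('"' == ch) = false := beq_eq_false_iff_ne.mpr (fun he => h5 he.symm)
  have e6 : ('\'' == ch) = false := beq_eq_false_iff_ne.mpr (fun he => h6 he.symm)
  simp [escA, escB, escTable, PySem.Dict.get?, PySem.Dict.insert, PySem.Dict.empty,
    List.find?, h1, h2, h3, h4, h5, h6, e1, e2, e3, e4, e5, e6]

lemma bChunk_nil : bChunk [] = [] := by simp [bChunk]

lemma bChunk_short (cs : List String) (h0 : cs ≠ []) (h : cs.length ≤ 16) :
    bChunk cs = ["    " ++ PySem.Str.join ", " cs] := by
  rw [bChunk]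
  simp [h0, List.take_of_length_le h, List.drop_eq_nil_of_le h, bChunk_nil]

lemma bChunk_full (cs rest : List String) (h : cs.length = 16) :
    bChunk (cs ++ rest) = ("    " ++ PySem.Str.join ", " cs) :: bChunk rest := by
  rw [bChunk]
  have hne : cs ++ rest ≠ [] := by
    intro he; have := congrArg List.length he; simp [h] at this
  simp [hne, List.take_left' h, List.drop_left' h]

lemma loop_eq (total : Int) (l : List Char) :
    ∀ (i : Int) (lines acc : List String), 0 ≤ i → total = i + l.length →
      PySem.Int.mod i 16 = acc.length →
      (PySem.List.enumerate l i).foldl (aStep total) (lines, acc)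
        = if l = [] then (lines, acc)
          else (lines ++ bChunk (acc ++ l.map escB), []) := by
  induction l with
  | nil => intro i lines acc _ _ _; simp [PySem.List.enumerate]
  | cons ch rest ih =>
    intro i lines acc hi htot hmod
    have hmod' : i % 16 = acc.length := by
      rw [← PySem.Int.mod_eq_emod_of_pos (by omega : (0:Int) < 16)]; exact hmod
    have hlt : (acc.length : Int) < 16 := by
      rw [← hmod']; exact Int.emod_lt_of_pos i (by omega)
    have hnn : (0:Int) ≤ acc.length := by positivity
    rw [PySem.List.enumerate_cons, List.foldl_cons]
    by_cases hrest : rest = []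
    · subst hrest
      have hlast : i = total - 1 := by simp at htot; omega
      have : aStep total (lines, acc) (i, ch)
          = (lines ++ ["    " ++ PySem.Str.join ", " (acc ++ [escA ch])], []) := by
        simp [aStep, hlast]
      rw [this]
      simp only [PySem.List.enumerate, List.foldl_nil]
      have hns : (ch :: ([] : List Char)) ≠ [] := by simp
      rw [if_neg hns]
      have hmap : List.map escB [ch] = [escB ch] := rfl
      rw [hmap, bChunk_short (acc ++ [escB ch]) (by simp) (by simp; omega)]
      simp [esc_eq]
    · have hinot : ¬ (i = total - 1) := by
        have : (0:Int) < rest.length := by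
          exact_mod_cast Int.natCast_pos.mpr (List.length_pos_iff.mpr hrest)
        simp at htot; omega
      by_cases hfl : acc.length = 15
      · have hm : (16:Int) ∣ (i + 1) := by omega
        have hstep : aStep total (lines, acc) (i, ch)
            = (lines ++ ["    " ++ PySem.Str.join ", " (acc ++ [escA ch])], []) := by
          simp [aStep, hm]
        rw [hstep]
        rw [ih (i + 1) _ [] (by omega) (by simp at htot ⊢; omega)
            (by rw [PySem.Int.mod_eq_emod_of_pos (by omega : (0:Int) < 16)]; simp; omega)]
        rw [if_neg hrest, if_neg (show ¬ (ch :: rest) = [] by simp)]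
        have : acc ++ (ch :: rest).map escB = (acc ++ [escB ch]) ++ rest.map escB := by simp
        rw [this, bChunk_full (acc ++ [escB ch]) _ (by simp; omega)]
        simp [esc_eq]
      · have hm : ¬ (16:Int) ∣ (i + 1) := by omega
        have hstep : aStep total (lines, acc) (i, ch) = (lines, acc ++ [escA ch]) := by
          simp [aStep, hm, hinot]
        rw [hstep]
        rw [ih (i + 1) _ (acc ++ [escA ch]) (by omega) (by simp at htot ⊢; omega)
            (by rw [PySem.Int.mod_eq_emod_of_pos (by omega : (0:Int) < 16)]; simp; omega)]
        rw [if_neg hrest, if_neg (show ¬ (ch :: rest) = [] by simp)]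
        have : acc ++ (ch :: rest).map escB = (acc ++ [escA ch]) ++ rest.map escB := by
          simp [esc_eq]
        rw [this]

lemma bLoop_eq (chars : List String) : ∀ (n : Nat), bLoop chars (n : Int) = bChunk (chars.drop n) := by
  intro n
  induction hn : chars.length - n using Nat.strong_induction_on generalizing n with
  | _ m ih =>
    rw [bLoop]
    by_cases h : (n : Int) < (chars.length : Int)
    · rw [dif_pos h]
      have hn' : n < chars.length := by exact_mod_cast h
      have hslice : PySem.List.slice chars (some (n : Int)) (some ((n : Int) + 16))
          = (chars.drop n).take 16 := by
        have := PySem.List.slice_natCast_add chars n 16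
        simpa using this
      have hd : chars.drop n ≠ [] := by
        intro he; have := congrArg List.length he; simp at this; omega
      rw [hslice, bChunk, dif_neg hd]
      have h16 : ((n : Int) + 16) = ((n + 16 : Nat) : Int) := by push_cast; ring
      rw [h16, ih (chars.length - (n + 16)) (by omega) (n + 16) rfl]
      simp [List.drop_drop]
    · rw [dif_neg h]
      have : chars.drop n = [] := by
        apply List.drop_eq_nil_of_le; omega
      rw [this, bChunk_nil]

-- ===== VERDICT (by name: the statement is the Claim_ definition above) =====
theorem text_to_c_array_spec : Claim_equal_text_to_c_array := by
  intro text var_name _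
  unfold Spec_text_to_c_array
  simp only [text_to_c_array, text_to_c_array_alt]
  by_cases h : text.toList = []
  · have hb : bLoop ([] : List String) 0 = [] := by rw [bLoop]; simp
    simp [h, PySem.List.enumerate_nil, hb]
  · rw [loop_eq (PySem.Str.len text) text.toList 0 [] [] le_rfl
        (by simp [PySem.Str.len_eq])
        (by rw [PySem.Int.mod_eq_emod_of_pos (by omega : (0:Int) < 16)]; simp)]
    have h0 : bLoop (text.toList.map escB) ((0 : Nat) : Int) = bChunk (text.toList.map escB) := by
      rw [bLoop_eq]; simp
    simp only [Nat.cast_zero] at h0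
    simp [h, h0]
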